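-- pv_equiv track=rewrite | github.com/shotaIDE/my-pet-melody | task/piece.py | _find_by_detection_count
-- ===== SOURCE A (Python) =====
-- from typing import Any, Optional
--
-- def _find_by_detection_count(
--     candidates: dict[int, list[list[int]]]
-- ) -> Optional[int]:
--     some_detected_list = {
--         threshould: non_silences
--         for threshould, non_silences in candidates.items()
--         if len(non_silences) > 0
--     }
--
--     if len(some_detected_list) == 0:
--         return None
--
--     segment_counts = {
--         threshould: len(non_silences)
--         for threshould, non_silences in some_detected_list.items()
--     }
--
--     sorted_segment_counts = sorted(
--         segment_counts.items(),
--         key=lambda x: x[1],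
--         reverse=True,
--     )
--
--     return sorted_segment_counts[0][0]
-- ===== SOURCE B (Python) =====
-- from typing import Optional
--
--
-- def _find_by_detection_count(
--     candidates: dict[int, list[list[int]]]
-- ) -> Optional[int]:
--     # Single pass: keep the first key whose segment count is strictly the
--     # largest so far; empty segment lists never beat the initial count 0.
--     best_key = None
--     best_count = 0
--     for threshold, non_silences in candidates.items():
--         if best_count < len(non_silences):
--             best_key = threshold
--             best_count = len(non_silences)
--     return best_key
-- ===== Notes on version B (the rewrite author's own statement) =====
-- stated objective: simpler
-- what changed: Replaces the filter-dict / count-dict / stable-reverse-sort / take-first pipeline with a single loop that keeps the first key attaining the strictly largest segment count.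
import Mathlib
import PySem

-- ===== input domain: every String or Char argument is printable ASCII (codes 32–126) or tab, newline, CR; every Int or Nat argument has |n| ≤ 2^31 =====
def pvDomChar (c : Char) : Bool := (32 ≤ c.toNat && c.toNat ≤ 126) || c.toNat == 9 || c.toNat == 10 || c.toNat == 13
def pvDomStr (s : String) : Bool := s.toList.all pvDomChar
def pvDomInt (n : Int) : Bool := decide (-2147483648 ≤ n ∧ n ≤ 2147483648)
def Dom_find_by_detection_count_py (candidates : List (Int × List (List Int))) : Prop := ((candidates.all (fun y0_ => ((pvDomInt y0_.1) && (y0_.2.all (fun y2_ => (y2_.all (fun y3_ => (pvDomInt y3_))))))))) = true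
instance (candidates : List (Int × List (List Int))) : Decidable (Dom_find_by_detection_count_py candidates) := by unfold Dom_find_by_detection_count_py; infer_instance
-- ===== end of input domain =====

-- B replaces A's filter/count/stable-reverse-sort/take-first pipeline with one
-- strict-argmax pass over the items; same return value on every dict input.


-- ===== PORT A =====
def find_by_detection_count_py (candidates : List (Int × List (List Int))) : Option Int :=
  let some_detected_list := candidates.filter (fun p => decide (0 < p.2.length))
  if some_detected_list.length = 0 then none
  else
    let segment_counts := some_detected_list.map (fun p => (p.1, (p.2.length : Int)))
    let sorted_segment_counts := PySem.List.sorted segment_counts (fun x => x.2) true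
    (PySem.List.pyGet? sorted_segment_counts 0).map (fun x => x.1)

-- ===== PORT B =====
def find_by_detection_count_py_alt (candidates : List (Int × List (List Int))) : Option Int :=
  (candidates.foldl
    (fun acc p => if acc.2 < (p.2.length : Int) then (some p.1, (p.2.length : Int)) else acc)
    ((none : Option Int), (0 : Int))).1

-- ===== PRECONDITION & SPEC =====
-- The Python parameter is a dict, whose keys are necessarily distinct; the
-- association-list encoding must therefore carry pairwise-distinct keys.
def Pre_find_by_detection_count_py (candidates : List (Int × List (List Int))) : Prop :=
  (candidates.map Prod.fst).Nodup
instance (candidates : List (Int × List (List Int))) : Decidable (Pre_find_by_detection_count_py candidates) := by unfold Pre_find_by_detection_count_py; infer_instance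

def pvWitness_find_by_detection_count_py : (List (Int × List (List Int))) :=
  [(3, [[1, 2]]), (5, [[0], [4]]), (7, [])]

def Spec_find_by_detection_count_py (candidates : List (Int × List (List Int))) (out : Option Int) : Prop := out = find_by_detection_count_py_alt candidates
instance (candidates : List (Int × List (List Int))) (out : Option Int) : Decidable (Spec_find_by_detection_count_py candidates out) := by unfold Spec_find_by_detection_count_py; infer_instance

-- ===== CLAIM (what is proved, stated in full; the proofs are below) =====
def Claim_equal_find_by_detection_count_py : Prop := ∀ (candidates : List (Int × List (List Int))), Dom_find_by_detection_count_py candidates → Pre_find_by_detection_count_py candidates → Spec_find_by_detection_count_py candidates (find_by_detection_count_py candidates)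

-- ===== LEMMAS AND PROOFS =====

-- Relation between A's running insertion-sorted list and B's accumulator:
-- the accumulator is nonnegative and mirrors the head of the sorted list.
def pvRel (L : List (Int × Int)) (acc : Option Int × Int) : Prop :=
  0 ≤ acc.2 ∧ (match L with
    | [] => acc = (none, 0)
    | m :: _ => acc = (some m.1, m.2))

-- A's filter-then-map-then-foldl pipeline collapses to one conditional foldl.
theorem pv_foldl_filter_map (g : List (Int × Int) → (Int × Int) → List (Int × Int))
    (cs : List (Int × List (List Int))) (init : List (Int × Int)) :
    (((cs.filter (fun p => decide (0 < p.2.length))).map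
        (fun p => (p.1, (p.2.length : Int)))).foldl g init)
      = cs.foldl (fun a x => if 0 < x.2.length then g a (x.1, (x.2.length : Int)) else a) init := by
  induction cs generalizing init with
  | nil => rfl
  | cons c rest ih =>
    by_cases h : 0 < c.2.length
    · simp [h, List.foldl, ih]
    · simp [h, List.foldl, ih]

-- Loop invariant: both folds preserve pvRel.
theorem pv_loop (cs : List (Int × List (List Int))) (L : List (Int × Int))
    (acc : Option Int × Int) (h : pvRel L acc) :
    pvRel
      (cs.foldl (fun a x => if 0 < x.2.length then
          PySem.List.insertBy (fun a b : Int × Int => decide (b.2 < a.2)) (x.1, (x.2.length : Int)) a else a) L)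
      (cs.foldl (fun acc p => if acc.2 < (p.2.length : Int) then (some p.1, (p.2.length : Int)) else acc) acc) := by
  induction cs generalizing L acc with
  | nil => exact h
  | cons c rest ih =>
    simp only [List.foldl]
    apply ih
    obtain ⟨hnn, hm⟩ := h
    by_cases hc : 0 < c.2.length
    · have hci : (0 : Int) < (c.2.length : Int) := by exact_mod_cast hc
      cases L with
      | nil =>
        have ha : acc = (none, 0) := hm
        subst ha
        rw [if_pos hc, if_pos (show ((none, 0) : Option Int × Int).2 < (c.2.length : Int) from hci)]
        exact ⟨Int.natCast_nonneg _, rfl⟩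
      | cons m t =>
        have ha : acc = (some m.1, m.2) := hm
        subst ha
        rw [if_pos hc]
        rw [show PySem.List.insertBy (fun a b : Int × Int => decide (b.2 < a.2)) (c.1, (c.2.length : Int)) (m :: t)
              = if decide (m.2 < (c.2.length : Int)) then (c.1, (c.2.length : Int)) :: m :: t
                else m :: PySem.List.insertBy (fun a b : Int × Int => decide (b.2 < a.2)) (c.1, (c.2.length : Int)) t from rfl]
        by_cases hlt : m.2 < (c.2.length : Int)
        · rw [if_pos (by simpa using hlt), if_pos (show ((some m.1, m.2) : Option Int × Int).2 < (c.2.length : Int) from hlt)]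
          exact ⟨Int.natCast_nonneg _, rfl⟩
        · rw [if_neg (by simpa using hlt), if_neg (show ¬ ((some m.1, m.2) : Option Int × Int).2 < (c.2.length : Int) from hlt)]
          exact ⟨hnn, rfl⟩
    · have h0 : c.2.length = 0 := Nat.eq_zero_of_not_pos hc
      have hnb : ¬ acc.2 < (c.2.length : Int) := by rw [h0]; push_cast; omega
      rw [if_neg hc, if_neg hnb]
      exact ⟨hnn, hm⟩

-- ===== VERDICT (by name: the statement is the Claim_ definition above) =====
theorem find_by_detection_count_py_spec : Claim_equal_find_by_detection_count_py := by
  intro candidates _ _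
  unfold Spec_find_by_detection_count_py find_by_detection_count_py find_by_detection_count_py_alt
  have hfm := pv_foldl_filter_map
    (fun acc x => PySem.List.insertBy (fun a b : Int × Int => decide (b.2 < a.2)) x acc)
    candidates []
  have hrel := pv_loop candidates [] ((none : Option Int), (0 : Int)) ⟨le_refl 0, rfl⟩
  rw [← hfm] at hrel
  dsimp only
  rw [PySem.List.sorted_rev_eq_foldl_insertBy]
  set F := candidates.filter (fun p => decide (0 < p.2.length)) with hF
  by_cases hnil : F.length = 0
  · rw [if_pos hnil]
    rw [List.length_eq_zero_iff] at hnil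
    rw [hnil] at hrel
    simp only [List.map_nil, List.foldl_nil] at hrel
    exact (congrArg Prod.fst hrel.2.symm)
  · rw [if_neg hnil]
    obtain ⟨hnn, hm⟩ := hrel
    match hS : (F.map (fun p => (p.1, (p.2.length : Int)))).foldl
        (fun acc x => PySem.List.insertBy (fun a b : Int × Int => decide (b.2 < a.2)) x acc) [] with
    | [] =>
      exfalso
      have hs0 : PySem.List.sorted (F.map (fun p => (p.1, (p.2.length : Int)))) (fun x => x.2) true = [] := by
        rw [PySem.List.sorted_rev_eq_foldl_insertBy]; exact hS
      rw [PySem.List.sorted_eq_nil_iff, List.map_eq_nil_iff] at hs0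
      exact hnil (by rw [hs0]; rfl)
    | m :: t =>
      rw [hS] at hm
      rw [hS, hm]
      simp [PySem.List.pyGet?, PySem.List.pyIdx?]
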